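-- pv_equiv track=rewrite | github.com/luckykamon/IPT | TD/prof/td07a.py | estStable
-- ===== SOURCE A (Python) =====
-- def somme(c,a):
--   return sum([int(a[i])*c[i] for i in range(len(c)) ])
--
-- def estStable(c,a,Obj):
--   s = somme(c,a)
--   if s < Obj:
--     return False
--   for k in range(len(a)):
--     if a[k] and s-c[k]>=Obj:
--       return False
--   return True
-- ===== SOURCE B (Python) =====
-- def estStable(c, a, Obj):
--     s = sum(int(x) * w for w, x in zip(c, a))
--     if s < Obj:
--         return False
--     for w, x in sorted(zip(c, a), key=lambda p: p[0]):
--         if x: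
--             return s - w < Obj
--     return True
-- ===== Notes on version B (the rewrite author's own statement) =====
-- stated objective: alternative
-- what changed: Replaces A's per-index existence scan with sort-then-probe: sort the (weight, selected) pairs ascending by weight and decide stability by one comparison against the first selected pair, which necessarily carries the minimal selected weight.
import Mathlib
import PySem

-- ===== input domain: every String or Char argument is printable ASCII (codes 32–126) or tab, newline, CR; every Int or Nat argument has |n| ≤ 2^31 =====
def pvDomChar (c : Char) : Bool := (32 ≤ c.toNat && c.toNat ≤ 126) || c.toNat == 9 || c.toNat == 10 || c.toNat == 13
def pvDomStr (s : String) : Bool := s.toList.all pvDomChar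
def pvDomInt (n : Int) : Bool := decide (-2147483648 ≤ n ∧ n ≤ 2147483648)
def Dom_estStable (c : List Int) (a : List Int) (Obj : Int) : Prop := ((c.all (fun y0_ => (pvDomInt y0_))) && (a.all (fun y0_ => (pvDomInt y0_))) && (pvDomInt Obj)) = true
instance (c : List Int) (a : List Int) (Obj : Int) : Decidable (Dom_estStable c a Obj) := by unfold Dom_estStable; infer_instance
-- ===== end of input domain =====

-- B replaces A's per-index early-return scan with sort-then-probe: sort the
-- (weight, selected) pairs ascending by weight and decide by one comparison
-- against the first selected pair (alternative decomposition, O(n log n)).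


-- ===== PORT A =====
-- somme(c, a) = sum([int(a[i])*c[i] for i in range(len(c))]); int() on an int is identity
def sommeA (c : List Int) (a : List Int) : Int :=
  ((PySem.List.pyRange 0 (c.length : Int) 1).map
    (fun i => PySem.List.pyGetD a i 0 * PySem.List.pyGetD c i 0)).sum

-- the early-return for-loop: for k in range(len(a)): if a[k] and s-c[k]>=Obj: return False
def estStableLoop (c : List Int) (a : List Int) (s : Int) (Obj : Int) : List Int → Bool
  | [] => true
  | k :: ks =>
    if PySem.List.pyGetD a k 0 ≠ 0 ∧ s - PySem.List.pyGetD c k 0 ≥ Obj then false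
    else estStableLoop c a s Obj ks

def estStable (c : List Int) (a : List Int) (Obj : Int) : Bool :=
  let s := sommeA c a
  if s < Obj then false
  else estStableLoop c a s Obj (PySem.List.pyRange 0 (a.length : Int) 1)

-- ===== PORT B =====
-- for w, x in sorted(zip(c, a), key=lambda p: p[0]): if x: return s - w < Obj
def findSel (s : Int) (Obj : Int) : List (Int × Int) → Bool
  | [] => true
  | p :: ps => if p.2 ≠ 0 then decide (s - p.1 < Obj) else findSel s Obj ps

def estStable_alt (c : List Int) (a : List Int) (Obj : Int) : Bool :=
  let s := ((c.zip a).map (fun p => p.2 * p.1)).sum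
  if s < Obj then false
  else findSel s Obj (PySem.List.sorted (c.zip a) (fun p => p.1) false)

-- ===== PRECONDITION & SPEC =====
-- Pre_ is exactly A's domain: len(c) ≤ len(a) (else somme raises IndexError), and either
-- every extra a[k] (k ≥ len(c)) is zero, or an early return fires first (s < Obj, or some
-- selected k < len(c) has s - c[k] ≥ Obj) before a truthy extra a[k] makes c[k] raise.
def Pre_estStable (c : List Int) (a : List Int) (Obj : Int) : Prop :=
  c.length ≤ a.length ∧
  ((∀ x ∈ a.drop c.length, x = 0) ∨
   ((c.zip a).map (fun p => p.2 * p.1)).sum < Obj ∨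
   ∃ k ∈ List.range c.length, a.getD k 0 ≠ 0 ∧
     ((c.zip a).map (fun p => p.2 * p.1)).sum - c.getD k 0 ≥ Obj)
instance (c : List Int) (a : List Int) (Obj : Int) : Decidable (Pre_estStable c a Obj) := by unfold Pre_estStable; infer_instance
def pvWitness_estStable : List Int × List Int × Int := ([2, 3], [1, 0], 2)

def Spec_estStable (c : List Int) (a : List Int) (Obj : Int) (out : Bool) : Prop := out = estStable_alt c a Obj
instance (c : List Int) (a : List Int) (Obj : Int) (out : Bool) : Decidable (Spec_estStable c a Obj out) := by unfold Spec_estStable; infer_instance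

-- ===== CLAIM (what is proved, stated in full; the proofs are below) =====
def Claim_equal_estStable : Prop := ∀ (c : List Int) (a : List Int) (Obj : Int), Dom_estStable c a Obj → Pre_estStable c a Obj → Spec_estStable c a Obj (estStable c a Obj)

-- ===== LEMMAS AND PROOFS =====

-- the two weighted sums agree when len(c) ≤ len(a) (zip truncates to len(c))
theorem sommeA_eq_zip (c a : List Int) (h : c.length ≤ a.length) :
    sommeA c a = ((c.zip a).map (fun p => p.2 * p.1)).sum := by
  unfold sommeA
  rw [PySem.List.pyRange_zero_nat, List.map_map]
  congr 1
  apply List.ext_getElem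
  · simp [List.length_zip]; omega
  · intro i h1 h2
    simp only [List.length_map, List.length_range] at h1
    have ha : i < a.length := by omega
    simp [List.getElem_zip, h1, ha]

-- the early-return loop returns true iff no index in the list triggers the condition
theorem estStableLoop_spec (c a : List Int) (s Obj : Int) (ks : List Int) :
    estStableLoop c a s Obj ks = true ↔
      ∀ k ∈ ks, ¬ (PySem.List.pyGetD a k 0 ≠ 0 ∧ s - PySem.List.pyGetD c k 0 ≥ Obj) := by
  induction ks with
  | nil => simp [estStableLoop]
  | cons k ks ih =>
    simp only [estStableLoop, List.mem_cons]
    split_ifs with hk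
    · constructor
      · intro hf; exact absurd hf (by simp)
      · intro H; exact absurd hk (H k (Or.inl rfl))
    · simp only [ih]
      constructor
      · rintro H x (rfl | hx)
        · exact hk
        · exact H x hx
      · intro H x hx; exact H x (Or.inr hx)

-- on a list ordered ascending by weight, the first-selected probe decides the
-- universal property: every selected pair satisfies s - w < Obj
theorem findSel_spec (s Obj : Int) (L : List (Int × Int))
    (hord : L.Pairwise (fun p q => p.1 ≤ q.1)) :
    findSel s Obj L = true ↔ ∀ p ∈ L, p.2 ≠ 0 → s - p.1 < Obj := by
  induction L with
  | nil => simp [findSel]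
  | cons p ps ih =>
    rw [List.pairwise_cons] at hord
    obtain ⟨hle, hps⟩ := hord
    simp only [findSel, List.mem_cons]
    split_ifs with hp
    · simp only [decide_eq_true_eq]
      constructor
      · rintro hlt q (rfl | hq) _
        · exact hlt
        · have := hle q hq; omega
      · intro H; exact H p (Or.inl rfl) hp
    · rw [ih hps]
      constructor
      · rintro H q (rfl | hq)
        · intro h; exact absurd h hp
        · exact H q hq
      · intro H q hq; exact H q (Or.inr hq)

-- membership in zip, index-wise
theorem mem_zip_iff (c a : List Int) (h : c.length ≤ a.length) (p : Int × Int) :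
    p ∈ c.zip a ↔ ∃ i : Nat, i < c.length ∧ c.getD i 0 = p.1 ∧ a.getD i 0 = p.2 := by
  constructor
  · intro hp
    obtain ⟨i, hi, hget⟩ := List.mem_iff_getElem.mp hp
    simp only [List.length_zip] at hi
    have hic : i < c.length := by omega
    have hia : i < a.length := by omega
    rw [List.getElem_zip] at hget
    exact ⟨i, hic, by simp_all [Prod.ext_iff]⟩
  · rintro ⟨i, hi, hc, ha⟩
    have hia : i < a.length := by omega
    have hz : i < (c.zip a).length := by simp only [List.length_zip]; omega
    rw [List.mem_iff_getElem]
    refine ⟨i, hz, ?_⟩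
    rw [List.getElem_zip]
    simp only [List.getD_eq_getElem, hi, hia] at hc ha
    exact Prod.ext hc ha

-- ===== VERDICT (by name: the statement is the Claim_ definition above) =====
theorem estStable_spec : Claim_equal_estStable := by
  intro c a Obj _ hpre
  obtain ⟨hle, hcase⟩ := hpre
  unfold Spec_estStable estStable estStable_alt
  rw [sommeA_eq_zip c a hle]
  set s := ((c.zip a).map (fun p => p.2 * p.1)).sum with hs
  by_cases hlt : s < Obj
  · simp [hlt]
  · simp only [if_neg hlt]
    have hord := PySem.List.sorted_pairwise (xs := c.zip a) (key := fun p => p.1)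
    have hmem : ∀ q : Int × Int,
        q ∈ PySem.List.sorted (c.zip a) (fun p => p.1) false ↔ q ∈ c.zip a := fun q =>
      PySem.List.mem_sorted _ _ _ _
    have hB := findSel_spec s Obj (PySem.List.sorted (c.zip a) (fun p => p.1) false) hord
    by_cases hex : ∃ k : Nat, k < c.length ∧ a.getD k 0 ≠ 0 ∧ s - c.getD k 0 ≥ Obj
    · -- an early return fires: both sides are false
      obtain ⟨k, hk, hne, hge⟩ := hex
      have hAfalse : estStableLoop c a s Obj (PySem.List.pyRange 0 (a.length : Int) 1) = false := by
        rcases hb : estStableLoop c a s Obj (PySem.List.pyRange 0 (a.length : Int) 1) with _ | _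
        · rfl
        · exfalso
          have := (estStableLoop_spec c a s Obj _).mp hb (k : Int)
            (by rw [PySem.List.mem_pyRange_one]; omega)
          simp only [PySem.List.pyGetD_natCast] at this
          exact this ⟨hne, hge⟩
      rw [hAfalse]
      have hBfalse : findSel s Obj (PySem.List.sorted (c.zip a) (fun p => p.1) false) = false := by
        rcases hb : findSel s Obj (PySem.List.sorted (c.zip a) (fun p => p.1) false) with _ | _
        · rfl
        · exfalso
          have hall := hB.mp hb (c.getD k 0, a.getD k 0)
            ((hmem _).mpr ((mem_zip_iff c a hle _).mpr ⟨k, hk, rfl, rfl⟩)) hne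
          omega
      rw [hBfalse]
    · -- no early return: the tail of a is all zeros and both sides are true
      push Not at hex
      have htr : ∀ x ∈ a.drop c.length, x = 0 := by
        rcases hcase with h | h | h
        · exact h
        · exact absurd h hlt
        · obtain ⟨k, hk, hne, hge⟩ := h
          rw [List.mem_range] at hk
          exact absurd hge (by have := hex k hk hne; omega)
      have hA : estStableLoop c a s Obj (PySem.List.pyRange 0 (a.length : Int) 1) = true := by
        rw [estStableLoop_spec]
        intro k hk
        rw [PySem.List.mem_pyRange_one] at hk
        have hkk : k = ((k.toNat : Nat) : Int) := by omega
        rw [hkk]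
        simp only [PySem.List.pyGetD_natCast]
        rintro ⟨hne, hge⟩
        by_cases hkc : k.toNat < c.length
        · exact absurd hge (by have := hex k.toNat hkc hne; omega)
        · have hka : k.toNat < a.length := by omega
          have h0 : a[k.toNat] = 0 := by
            have : a[k.toNat] ∈ a.drop c.length := by
              rw [List.mem_iff_getElem]
              exact ⟨k.toNat - c.length, by simp [List.length_drop]; omega, by
                rw [List.getElem_drop]; congr 1; omega⟩
            exact htr _ this
          exact hne (by simp [hka, h0])
      rw [hA]
      have hBtrue : findSel s Obj (PySem.List.sorted (c.zip a) (fun p => p.1) false) = true := by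
        rw [hB]
        intro p hp hsel
        obtain ⟨i, hi, hc, ha⟩ := (mem_zip_iff c a hle p).mp ((hmem p).mp hp)
        have := hex i hi (by rw [ha]; exact hsel)
        omega
      rw [hBtrue]
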